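-- pv_equiv track=rewrite | github.com/jamseblew/discord-bot | scripts/handlers/pattern_validator.py | is_valid_var
-- ===== SOURCE A (Python) =====
-- VALID_CHAR_SET = set(
--     'abcdefghijklmnopqrstuvwxyzABCDEFGHIJKLMNOPQRSTUVWXYZ_'
-- )
--
-- def is_valid_char(c: str):
--     return c in VALID_CHAR_SET
--
-- def is_valid_var(var: str):
--     """
--     test if the variable name is valid
--     """
--     var = var.split(':')
--     if len(var) > 2:
--         return False
--     for part in var:
--         if not all(map(is_valid_char, part)):
--             return False
--     return True
-- ===== SOURCE B (Python) =====
-- VALID_CHAR_SET = set(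
--     'abcdefghijklmnopqrstuvwxyzABCDEFGHIJKLMNOPQRSTUVWXYZ_'
-- )
--
-- def is_valid_var(var: str):
--     """
--     test if the variable name is valid
--     """
--     colons = 0
--     for c in var:
--         if c == ':':
--             colons += 1
--         elif c not in VALID_CHAR_SET:
--             return False
--     return colons <= 1
-- ===== Notes on version B (the rewrite author's own statement) =====
-- stated objective: simpler
-- what changed: Replaced split-into-parts plus nested per-part character loops by one flat scan over the string that counts colons and rejects on the first invalid non-colon character.
import Mathlib
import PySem

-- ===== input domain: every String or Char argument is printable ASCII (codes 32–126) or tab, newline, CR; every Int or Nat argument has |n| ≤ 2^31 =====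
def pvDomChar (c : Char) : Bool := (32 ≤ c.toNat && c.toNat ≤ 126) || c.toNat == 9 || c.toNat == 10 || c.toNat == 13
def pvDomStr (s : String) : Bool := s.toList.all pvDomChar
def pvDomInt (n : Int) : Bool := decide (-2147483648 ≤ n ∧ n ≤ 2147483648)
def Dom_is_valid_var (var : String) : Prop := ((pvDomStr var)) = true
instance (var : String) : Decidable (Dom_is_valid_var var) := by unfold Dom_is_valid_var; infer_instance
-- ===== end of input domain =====

-- B replaces A's split-into-parts + nested per-part loops by a single flat scan
-- counting colons and rejecting the first invalid non-colon character (objective: simpler).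


-- ===== PORT A =====
def VALID_CHAR_SET : PySem.Set Char :=
  PySem.Set.ofList "abcdefghijklmnopqrstuvwxyzABCDEFGHIJKLMNOPQRSTUVWXYZ_".toList

def is_valid_char (c : Char) : Bool := PySem.Set.contains VALID_CHAR_SET c

def is_valid_var (var : String) : Bool :=
  let parts := PySem.Chars.splitOn var.toList [':']
  if parts.length > 2 then false
  else parts.all (fun part => part.all (fun c => is_valid_char c))

-- ===== PORT B =====
-- the for-loop of Source B with its running colon counter and early False return
def is_valid_var_altGo : List Char → Nat → Bool
  | [], colons => colons ≤ 1
  | c :: rest, colons =>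
    if c = ':' then is_valid_var_altGo rest (colons + 1)
    else if PySem.Set.contains VALID_CHAR_SET c then is_valid_var_altGo rest colons
    else false

def is_valid_var_alt (var : String) : Bool := is_valid_var_altGo var.toList 0

-- ===== PRECONDITION & SPEC =====
def Spec_is_valid_var (var : String) (out : Bool) : Prop := out = is_valid_var_alt var
instance (var : String) (out : Bool) : Decidable (Spec_is_valid_var var out) := by unfold Spec_is_valid_var; infer_instance

-- ===== CLAIM (what is proved, stated in full; the proofs are below) =====
def Claim_equal_is_valid_var : Prop := ∀ (var : String), Dom_is_valid_var var → Spec_is_valid_var var (is_valid_var var)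

-- ===== LEMMAS AND PROOFS =====

-- reference splitter for a single-character separator ':'
def colonSegs : List Char → List Char → List (List Char)
  | cur, [] => [cur.reverse]
  | cur, c :: rest =>
    if c = ':' then cur.reverse :: colonSegs [] rest
    else colonSegs (c :: cur) rest

lemma splitOn_go_colon (fuel : Nat) (l cur : List Char) (acc : List (List Char))
    (h : l.length ≤ fuel) :
    PySem.Chars.splitOn.go [':'] fuel l cur acc = acc.reverse ++ colonSegs cur l := by
  induction fuel generalizing l cur acc with
  | zero =>
    have : l = [] := List.length_eq_zero_iff.mp (Nat.le_zero.mp h)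
    subst this
    simp [PySem.Chars.splitOn.go, colonSegs]
  | succ n ih =>
    cases l with
    | nil => simp [PySem.Chars.splitOn.go, colonSegs]
    | cons c rest =>
      simp only [List.length_cons, Nat.succ_le_succ_iff] at h
      by_cases hc : c = ':'
      · subst hc
        have hp : ([':'] : List Char).isPrefixOf (':' :: rest) = true := by
          simp [List.isPrefixOf]
        simp only [PySem.Chars.splitOn.go, hp, if_true]
        rw [show List.drop ([':'] : List Char).length (':' :: rest) = rest from rfl,
          ih rest [] _ h]
        simp [colonSegs]
      · have hp : ([':'] : List Char).isPrefixOf (c :: rest) = false := by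
          simp only [List.isPrefixOf, Bool.and_eq_false_iff, beq_eq_false_iff_ne, ne_eq]
          exact Or.inl fun h2 => hc h2.symm
        simp only [PySem.Chars.splitOn.go, hp, Bool.false_eq_true, if_false]
        rw [ih rest (c :: cur) _ h]
        simp [colonSegs, hc]

lemma splitOn_colon (l : List Char) :
    PySem.Chars.splitOn l [':'] = colonSegs [] l := by
  have := splitOn_go_colon (l.length + 1) l [] [] (by omega)
  simpa [PySem.Chars.splitOn] using this

lemma colonSegs_length (l : List Char) : ∀ cur,
    (colonSegs cur l).length = l.count ':' + 1 := by
  induction l with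
  | nil => intro cur; simp [colonSegs]
  | cons c rest ih =>
    intro cur
    by_cases hc : c = ':'
    · subst hc; simp [colonSegs, ih, List.count_cons]
    · simp [colonSegs, hc, ih, List.count_cons]

lemma colonSegs_all (l : List Char) : ∀ cur,
    ((colonSegs cur l).all (fun part => part.all (fun c => is_valid_char c)))
      = (cur.all (fun c => is_valid_char c)
          && l.all (fun c => c == ':' || is_valid_char c)) := by
  induction l with
  | nil => intro cur; simp [colonSegs]
  | cons c rest ih =>
    intro cur
    by_cases hc : c = ':'
    · subst hc; simp [colonSegs, ih]
    · simp only [colonSegs, if_neg hc, ih, List.all_cons]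
      have : (c == ':') = false := by simpa using hc
      cases hv : is_valid_char c <;>
        simp [this, hv, Bool.and_comm, Bool.and_assoc, Bool.and_left_comm]

lemma altGo_spec (l : List Char) : ∀ n,
    is_valid_var_altGo l n
      = (l.all (fun c => c == ':' || is_valid_char c)
          && decide (n + l.count ':' ≤ 1)) := by
  induction l with
  | nil => intro n; simp [is_valid_var_altGo]
  | cons c rest ih =>
    intro n
    by_cases hc : c = ':'
    · subst hc
      rw [show is_valid_var_altGo (':' :: rest) n = is_valid_var_altGo rest (n + 1) from rfl,
        ih, show n + 1 + List.count ':' rest = n + (List.count ':' rest + 1) from by omega]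
      simp [List.count_cons]
    · have hne : (c == ':') = false := by simpa using hc
      have hdef : PySem.Set.contains VALID_CHAR_SET c = is_valid_char c := rfl
      rw [show is_valid_var_altGo (c :: rest) n
          = (if c = ':' then is_valid_var_altGo rest (n + 1)
             else if PySem.Set.contains VALID_CHAR_SET c then is_valid_var_altGo rest n
             else false) from rfl, if_neg hc, hdef]
      cases hv : is_valid_char c
      · simp [hv, hne]
      · simp [hv, hne, ih, List.count_cons, hc]

-- ===== VERDICT (by name: the statement is the Claim_ definition above) =====
theorem is_valid_var_spec : Claim_equal_is_valid_var := by
  intro var _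
  unfold Spec_is_valid_var is_valid_var is_valid_var_alt
  simp only [splitOn_colon, colonSegs_length, colonSegs_all, altGo_spec,
    List.all_nil, Bool.true_and]
  by_cases h : List.count ':' var.toList + 1 > 2
  · simp [h]
    exact fun _ => by omega
  · simp [h]
    exact fun _ => by omega
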